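-- pv_equiv track=rewrite | github.com/C-MartinezWaterloo/RPSAps360 | prepare_ann_tensors.py | _build_category_maps
-- ===== SOURCE A (Python) =====
-- from collections import Counter
--
-- def _build_category_maps(
--     cat_counts: dict[str, Counter[str]],
--     max_categories: int | None,
-- ) -> dict[str, dict[str, int]]:
--     """
--     Build a mapping {column: {category_string: integer_index}}.
--
--     - "__NA__" always exists (used for missing values)
--     - If `max_categories` is set, categories are truncated by frequency and
--       "__OTHER__" is added for anything unseen/trimmed.
--     """
--
--     maps: dict[str, dict[str, int]] = {}
--     for col, counter in cat_counts.items():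
--         counter = counter.copy()
--         counter.setdefault("__NA__", 0)
--
--         items = list(counter.items())
--         items.sort(key=lambda kv: (-kv[1], kv[0]))
--
--         keep: list[str]
--         if max_categories is None:
--             keep = [k for k, _ in items]
--         else:
--             keep = [k for k, _ in items[: max(1, max_categories)]]
--
--         if "__NA__" not in keep:
--             keep.insert(0, "__NA__")
--
--         # If truncating, reserve __OTHER__ for unseen/trimmed categories.
--         if max_categories is not None and "__OTHER__" not in keep:
--             keep.append("__OTHER__")
--
--         col_map: dict[str, int] = {cat: i for i, cat in enumerate(keep)}
--         maps[col] = col_map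
--     return maps
-- ===== SOURCE B (Python) =====
-- def _build_category_maps(cat_counts, max_categories):
--     """Staged-passes re-implementation: the order is produced as a nested
--     comprehension over the distinct counts (descending), with names selected
--     by an equality filter and sorted inside each frequency class; the whole
--     result is one dict comprehension over the columns (keys are unique, so
--     no overwrites happen)."""
--     return {col: _col_map(counter, max_categories)
--             for col, counter in cat_counts.items()}
--
--
-- def _col_map(counter, max_categories):
--     counts = dict(counter)
--     if "__NA__" not in counts:
--         counts["__NA__"] = 0
--
--     order = [name
--              for n in sorted(set(counts.values()), reverse=True)
--              for name in sorted(k for k, v in counts.items() if v == n)]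
--
--     if max_categories is None:
--         keep = order
--     else:
--         keep = order[: max(1, max_categories)]
--         if "__NA__" not in keep:
--             keep = ["__NA__"] + keep
--         if "__OTHER__" not in keep:
--             keep = keep + ["__OTHER__"]
--
--     return dict(zip(keep, range(len(keep))))
-- ===== Notes on version B (the rewrite author's own statement) =====
-- stated objective: alternative
-- what changed: Replaces A's single full sort of (category,count) pairs by the composite key (-count, name) with staged passes: the distinct counts are collected into a set and sorted descending, and for each count the matching names are selected by an equality filter and sorted, a nested comprehension concatenating the frequency classes; the per-column dict is dict(zip(keep, range(...))) and the outer loop is a dict comprehension over columns instead of an explicit loop with insertions.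
import Mathlib
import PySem

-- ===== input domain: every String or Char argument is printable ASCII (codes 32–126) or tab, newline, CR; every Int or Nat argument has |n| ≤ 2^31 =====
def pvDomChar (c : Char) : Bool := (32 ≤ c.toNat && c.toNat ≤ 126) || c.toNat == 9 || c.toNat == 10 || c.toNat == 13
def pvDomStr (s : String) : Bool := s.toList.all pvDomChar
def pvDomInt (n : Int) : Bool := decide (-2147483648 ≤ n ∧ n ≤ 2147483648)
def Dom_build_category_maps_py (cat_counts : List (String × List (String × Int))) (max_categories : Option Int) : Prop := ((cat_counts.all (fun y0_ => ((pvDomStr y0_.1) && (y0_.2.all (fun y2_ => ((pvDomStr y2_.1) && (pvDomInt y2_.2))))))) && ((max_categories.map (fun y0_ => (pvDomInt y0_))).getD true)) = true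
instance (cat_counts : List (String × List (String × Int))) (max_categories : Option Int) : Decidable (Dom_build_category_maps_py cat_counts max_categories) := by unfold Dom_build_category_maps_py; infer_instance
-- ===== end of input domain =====

-- B replaces A's full composite-key sort with staged passes: distinct counts sorted descending,
-- names filtered per count and sorted inside each class; an alternative algorithm of similar cost.

-- ===== PORT A =====
-- per-column body of A's loop: copy+setdefault, sort by (-count, name), truncate, __NA__/__OTHER__, enumerate
def pyColMapA (ctr : List (String × Int)) (mc : Option Int) : List (String × Int) :=
  let counter := (PySem.Dict.ofList ctr).setdefault "__NA__" 0
  let items := PySem.List.sorted2 counter.items (fun kv => -kv.2) (fun kv => kv.1)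
  let keep : List String :=
    match mc with
    | none => items.map (fun kv => kv.1)
    | some m => (PySem.List.slice items none (some (max 1 m))).map (fun kv => kv.1)
  let keep := if keep.contains "__NA__" then keep else PySem.List.insert keep 0 "__NA__"
  let keep := if mc.isSome && !keep.contains "__OTHER__" then keep ++ ["__OTHER__"] else keep
  ((PySem.List.enumerate keep 0).foldl (fun d p => d.insert p.2 p.1) PySem.Dict.empty).items

def build_category_maps_py (cat_counts : List (String × List (String × Int))) (max_categories : Option Int) : List (String × List (String × Int)) :=
  ((PySem.Dict.ofList cat_counts).items.foldl
    (fun maps p => maps.insert p.1 (pyColMapA p.2 max_categories)) PySem.Dict.empty).items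

-- ===== PORT B =====
-- _col_map: distinct counts sorted descending; for each count, the names with that count, sorted;
-- then the truncation / sentinel handling of Source B; dict(zip(keep, range(len(keep))))
def pyColMapB (ctr : List (String × Int)) (mc : Option Int) : List (String × Int) :=
  let counts := PySem.Dict.ofList ctr
  let counts := if counts.contains "__NA__" then counts else counts.insert "__NA__" 0
  let order :=
    (PySem.List.sorted (PySem.Set.ofList counts.values) (fun n => n) true).flatMap
      (fun n => PySem.List.sorted
        ((counts.items.filter (fun kv => kv.2 == n)).map (fun kv => kv.1)) (fun c => c))
  let keep : List String :=
    match mc with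
    | none => order
    | some m =>
      let t := PySem.List.slice order none (some (max 1 m))
      let t := if t.contains "__NA__" then t else "__NA__" :: t
      if t.contains "__OTHER__" then t else t ++ ["__OTHER__"]
  (PySem.Dict.ofList (keep.zip (PySem.List.pyRange 0 (PySem.List.len keep) 1))).items

-- the outer dict comprehension in Source B runs over dict items, whose keys are unique, so it is
-- exactly a per-item map (no overwrite can occur)
def build_category_maps_py_alt (cat_counts : List (String × List (String × Int))) (max_categories : Option Int) : List (String × List (String × Int)) :=
  (PySem.Dict.ofList cat_counts).items.map (fun p => (p.1, pyColMapB p.2 max_categories))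

-- ===== PRECONDITION & SPEC =====
def Spec_build_category_maps_py (cat_counts : List (String × List (String × Int))) (max_categories : Option Int) (out : List (String × List (String × Int))) : Prop := out = build_category_maps_py_alt cat_counts max_categories
instance (cat_counts : List (String × List (String × Int))) (max_categories : Option Int) (out : List (String × List (String × Int))) : Decidable (Spec_build_category_maps_py cat_counts max_categories out) := by unfold Spec_build_category_maps_py; infer_instance

-- ===== CLAIM (what is proved, stated in full; the proofs are below) =====
def Claim_equal_build_category_maps_py : Prop := ∀ (cat_counts : List (String × List (String × Int))) (max_categories : Option Int), Dom_build_category_maps_py cat_counts max_categories → Spec_build_category_maps_py cat_counts max_categories (build_category_maps_py cat_counts max_categories)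

-- ===== LEMMAS AND PROOFS =====

-- abbreviations used only by the proofs
def pvNames (l : List (String × Int)) (n : Int) : List String :=
  (l.filter (fun p => p.2 == n)).map (fun p => p.1)

def pvNs (l : List (String × Int)) : List Int :=
  PySem.List.sorted (PySem.Set.ofList (l.map (fun p => p.2))) (fun n => n) true

def pvYs (l : List (String × Int)) : List (String × Int) :=
  (pvNs l).flatMap (fun n => (PySem.List.sorted (pvNames l n) (fun c => c)).map (fun c => (c, n)))

-- sorted2 with two linearly ordered keys is sorted with the lexicographic key
theorem sorted2_eq_sorted_lex {α κ₁ κ₂ : Type} [LinearOrder κ₁] [LinearOrder κ₂]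
    (xs : List α) (k1 : α → κ₁) (k2 : α → κ₂) :
    PySem.List.sorted2 xs k1 k2 = PySem.List.sorted xs (fun x => toLex (k1 x, k2 x)) := by
  have h : (fun (a b : α) => decide (k1 a < k1 b) || (!decide (k1 b < k1 a) && decide (k2 a < k2 b)))
      = fun (a b : α) => decide ((toLex (k1 a, k2 a) : Lex (κ₁ × κ₂)) < toLex (k1 b, k2 b)) := by
    funext a b
    rcases lt_trichotomy (k1 a) (k1 b) with h | h | h
    · simp [Prod.Lex.lt_iff, h, not_lt_of_gt h]
    · simp [Prod.Lex.lt_iff, h]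
    · simp [Prod.Lex.lt_iff, not_lt_of_gt h, not_lt_of_gt, (ne_of_gt h).symm, h]
  unfold PySem.List.sorted2 PySem.List.sorted
  simp only [Bool.false_eq_true, if_false, h]

-- pointwise permutations lift to flatMap
theorem flatMap_perm_congr {α β : Type} (ns : List α) (f g : α → List β)
    (h : ∀ n ∈ ns, (f n).Perm (g n)) : (ns.flatMap f).Perm (ns.flatMap g) := by
  induction ns with
  | nil => simp
  | cons a t ih =>
      simp only [List.flatMap_cons]
      exact (h a (List.mem_cons_self)).append (ih (fun n hn => h n (List.mem_cons_of_mem a hn)))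

-- flatMap of the per-value filters over a Nodup cover is a permutation of the list
theorem flatMap_filter_perm (ns : List Int) (l : List (String × Int))
    (hnd : ns.Nodup) (hcov : ∀ p ∈ l, p.2 ∈ ns) :
    (ns.flatMap (fun n => l.filter (fun p => p.2 == n))).Perm l := by
  induction ns generalizing l with
  | nil =>
      have : l = [] := by
        cases l with
        | nil => rfl
        | cons p t => exact absurd (hcov p List.mem_cons_self) (List.not_mem_nil)
      simp [this]
  | cons n ns ih =>
      simp only [List.flatMap_cons]
      have hnn : n ∉ ns := (List.nodup_cons.mp hnd).1
      have hrw : ns.flatMap (fun m => l.filter (fun p => p.2 == m))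
          = ns.flatMap (fun m => (l.filter (fun p => !(p.2 == n))).filter (fun p => p.2 == m)) := by
        apply List.flatMap_congr
        intro m hm
        rw [List.filter_filter]
        apply List.filter_congr
        intro p _
        by_cases h : p.2 = m
        · have hne : ¬ m = n := by rintro rfl; exact hnn hm
          simp [h, hne]
        · simp [h]
      rw [hrw]
      have hih := ih (l.filter (fun p => !(p.2 == n))) (List.nodup_cons.mp hnd).2 ?_
      · exact ((List.Perm.append_left _ hih).trans (List.filter_append_perm _ l))
      · intro p hp
        have hm := List.mem_filter.mp hp
        rcases hcov p hm.1 with h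
        rcases List.mem_cons.mp h with h1 | h1
        · exfalso; have h2 := hm.2; simp [h1] at h2
        · exact h1

theorem pvYs_perm (l : List (String × Int)) : (pvYs l).Perm l := by
  have hinner : ∀ n, ((PySem.List.sorted (pvNames l n) (fun c => c)).map (fun c => (c, n))).Perm
      (l.filter (fun p => p.2 == n)) := by
    intro n
    have h1 := (PySem.List.sorted_perm (pvNames l n) (fun c => c) false).map (fun c => (c, n))
    have h2 : (pvNames l n).map (fun c => (c, n)) = l.filter (fun p => p.2 == n) := by
      unfold pvNames
      rw [List.map_map]
      conv_rhs => rw [← List.map_id (l.filter (fun p => p.2 == n))]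
      apply List.map_congr_left
      intro p hp
      have h3 := (List.mem_filter.mp hp).2
      simp only [beq_iff_eq] at h3
      simp only [Function.comp, id_eq, ← h3]
    rw [h2] at h1
    exact h1
  have hstep := flatMap_perm_congr (pvNs l) _ _ (fun n _ => hinner n)
  have houter : (pvNs l).Perm (PySem.Set.ofList (l.map (fun p => p.2))) :=
    PySem.List.sorted_perm _ _ _
  have hmid := List.Perm.flatMap_right (fun n => l.filter (fun p => p.2 == n)) houter
  have hlast := flatMap_filter_perm (PySem.Set.ofList (l.map (fun p => p.2))) l
      (PySem.Set.nodup_ofList _) ?_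
  · exact (hstep.trans hmid).trans hlast
  · intro p hp
    rw [PySem.Set.mem_ofList]
    exact List.mem_map.mpr ⟨p, hp, rfl⟩

theorem pvYs_pairwise (l : List (String × Int)) (hnd : (l.map (fun p => p.1)).Nodup) :
    (pvYs l).Pairwise (fun a b => (toLex (-a.2, a.1) : Lex (Int × String)) < toLex (-b.2, b.1)) := by
  have hnames : ∀ n, (pvNames l n).Nodup := by
    intro n
    unfold pvNames
    have hsub : (l.filter (fun p => p.2 == n)).Sublist l := List.filter_sublist
    exact hnd.sublist (hsub.map (fun p => p.1))
  unfold pvYs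
  rw [List.flatMap_def]
  rw [List.pairwise_flatten]
  constructor
  · intro inner hin
    obtain ⟨n, _, rfl⟩ := List.mem_map.mp hin
    rw [List.pairwise_map]
    have hlt : (PySem.List.sorted (pvNames l n) (fun c => c)).Pairwise (· < ·) := by
      have h1 := PySem.List.sorted_pairwise (pvNames l n) (fun c => c)
      have h2 : (PySem.List.sorted (pvNames l n) (fun c => c)).Nodup :=
        (PySem.List.sorted_perm (pvNames l n) (fun c => c) false).symm.nodup (hnames n)
      exact (h1.and h2).imp (fun h => lt_of_le_of_ne h.1 h.2)
    exact hlt.imp (fun h => by rw [Prod.Lex.toLex_lt_toLex]; exact Or.inr ⟨rfl, h⟩)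
  · rw [List.pairwise_map]
    have houter : (pvNs l).Pairwise (fun n m => m < n) := by
      have h1 := PySem.List.sorted_pairwise_rev (PySem.Set.ofList (l.map (fun p => p.2))) (fun n => n)
      have h2 : (pvNs l).Nodup :=
        (PySem.List.sorted_perm _ (fun n => n) true).symm.nodup (PySem.Set.nodup_ofList _)
      exact (h1.and h2).imp (fun h => lt_of_le_of_ne h.1 (Ne.symm h.2))
    apply houter.imp
    intro n m hlt x hx y hy
    obtain ⟨c, _, rfl⟩ := List.mem_map.mp hx
    obtain ⟨c', _, rfl⟩ := List.mem_map.mp hy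
    rw [Prod.Lex.toLex_lt_toLex]; exact Or.inl (by simp; omega)

-- the heart: A's composite-key sort is B's walk over the frequency classes
theorem sorted2_eq_pvYs (l : List (String × Int)) (hnd : (l.map (fun p => p.1)).Nodup) :
    PySem.List.sorted2 l (fun kv => -kv.2) (fun kv => kv.1) = pvYs l := by
  rw [sorted2_eq_sorted_lex]
  exact PySem.List.sorted_eq_of_perm_of_pairwise_lt _ _ _ (pvYs_perm l) (pvYs_pairwise l hnd)

theorem pvYs_map_fst (l : List (String × Int)) :
    (pvYs l).map (fun p => p.1) = (pvNs l).flatMap (fun n => PySem.List.sorted (pvNames l n) (fun c => c)) := by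
  unfold pvYs
  rw [List.map_flatMap]
  apply List.flatMap_congr
  intro n _
  rw [List.map_map, show ((fun (p : String × Int) => p.1) ∘ fun c => (c, n)) = id from rfl, List.map_id]

-- A's enumerate-fold builds the same dict as B's dict(zip(keep, range(len(keep))))
theorem enumerate_zip_fold (xs : List String) (s : Int) (d : PySem.Dict String Int) :
    (PySem.List.enumerate xs s).foldl (fun d p => d.insert p.2 p.1) d
      = (xs.zip (PySem.List.pyRange s (s + (xs.length : Int)) 1)).foldl (fun d p => d.insert p.1 p.2) d := by
  induction xs generalizing s d with
  | nil => simp [PySem.List.enumerate_nil]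
  | cons x t ih =>
      rw [PySem.List.enumerate_cons]
      have hr : PySem.List.pyRange s (s + ((x :: t).length : Int)) 1
          = s :: PySem.List.pyRange (s + 1) ((s + 1) + (t.length : Int)) 1 := by
        rw [show s + (((x :: t).length : Nat) : Int) = (s + 1) + (t.length : Int) by push_cast [List.length_cons]; ring]
        exact PySem.List.pyRange_one_cons (by omega)
      rw [hr]
      simp only [List.zip_cons_cons, List.foldl_cons]
      exact ih (s + 1) (d.insert x s)

theorem colmap_eq (ctr : List (String × Int)) (mc : Option Int) :
    pyColMapA ctr mc = pyColMapB ctr mc := by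
  unfold pyColMapA pyColMapB
  simp only []
  -- B's explicit membership test is A's setdefault
  have hsd : (if (PySem.Dict.ofList ctr).contains "__NA__" then PySem.Dict.ofList ctr
      else (PySem.Dict.ofList ctr).insert "__NA__" 0)
      = (PySem.Dict.ofList ctr).setdefault "__NA__" 0 := by
    by_cases h : (PySem.Dict.ofList ctr).contains "__NA__"
    · rw [if_pos h, PySem.Dict.setdefault_of_contains (h := h)]
    · rw [if_neg h, PySem.Dict.setdefault_of_not_contains (h := by simpa using h)]
  rw [hsd]
  set C := (PySem.Dict.ofList ctr).setdefault "__NA__" 0 with hC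
  have hnd : (C.items.map (fun p => p.1)).Nodup := by
    have : C.items.map (fun p => p.1) = C.keys := rfl
    rw [this, hC, PySem.Dict.keys_setdefault]
    split_ifs with h
    · exact PySem.Dict.nodup_keys_ofList ctr
    · rw [List.nodup_append]
      refine ⟨PySem.Dict.nodup_keys_ofList ctr, List.nodup_singleton _, ?_⟩
      intro a ha b hb
      rw [List.mem_singleton] at hb
      subst hb
      intro heq
      subst heq
      exact h ((PySem.Dict.contains_iff_mem_keys _ _).mpr ha)
  -- B's staged order is A's sorted items with counts dropped
  have horder :
      (PySem.List.sorted (PySem.Set.ofList C.values) (fun n => n) true).flatMap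
        (fun n => PySem.List.sorted
          ((C.items.filter (fun kv => kv.2 == n)).map (fun kv => kv.1)) (fun c => c))
      = (PySem.List.sorted2 C.items (fun kv => -kv.2) (fun kv => kv.1)).map (fun kv => kv.1) := by
    rw [sorted2_eq_pvYs C.items hnd, pvYs_map_fst]
    rfl
  rw [horder]
  set S := (PySem.List.sorted2 C.items (fun kv => -kv.2) (fun kv => kv.1)).map (fun kv => kv.1) with hS
  have hNAmem : "__NA__" ∈ S := by
    rw [hS]
    apply List.mem_map.mpr
    have hk : "__NA__" ∈ C.keys := by
      apply (PySem.Dict.contains_iff_mem_keys _ _).mp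
      rw [hC, PySem.Dict.contains_setdefault]
      simp
    obtain ⟨p, hp, hp1⟩ := List.mem_map.mp hk
    exact ⟨p, (PySem.List.sorted2_perm _ _ _ _).mem_iff.mpr hp, hp1⟩
  -- with the same keep list, the two dict constructions agree
  have hfold : ∀ ka kb : List String, ka = kb →
      ((PySem.List.enumerate ka 0).foldl (fun d p => d.insert p.2 p.1) PySem.Dict.empty).items
      = (PySem.Dict.ofList (kb.zip (PySem.List.pyRange 0 (PySem.List.len kb) 1))).items := by
    rintro ka kb rfl
    congr 1
    have h2 := enumerate_zip_fold ka 0 PySem.Dict.empty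
    rw [zero_add] at h2
    exact h2
  refine hfold _ _ ?_
  cases mc with
  | none =>
      dsimp only
      simp [hNAmem]
  | some m =>
      have hmax : (0 : Int) ≤ max 1 m := le_trans zero_le_one (le_max_left 1 m)
      have hms : (PySem.List.slice (PySem.List.sorted2 C.items (fun kv => -kv.2) (fun kv => kv.1)) none (some (max 1 m))).map (fun kv => kv.1)
          = PySem.List.slice S none (some (max 1 m)) := by
        rw [PySem.List.slice_to _ hmax, PySem.List.slice_to _ hmax, List.map_take, hS]
      dsimp only
      simp only [hms, PySem.List.insert_zero, Option.isSome_some, Bool.true_and]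
      split_ifs <;> simp_all

-- A's outer insertion loop over distinct fresh column keys is B's per-item map
theorem outer_fold_eq_map (l : List (String × List (String × Int))) (mc : Option Int)
    (hnd : (l.map (fun p => p.1)).Nodup) :
    (l.foldl (fun maps p => maps.insert p.1 (pyColMapA p.2 mc)) PySem.Dict.empty).items
      = l.map (fun p => (p.1, pyColMapA p.2 mc)) := by
  have h := PySem.Dict.items_foldl_insert_fresh l (fun p => p.1) (fun p => pyColMapA p.2 mc)
    PySem.Dict.empty (fun a _ => PySem.Dict.contains_empty _) hnd
  simpa using h

-- ===== VERDICT (by name: the statement is the Claim_ definition above) =====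
theorem build_category_maps_py_spec : Claim_equal_build_category_maps_py := by
  intro cc mc _
  unfold Spec_build_category_maps_py build_category_maps_py build_category_maps_py_alt
  rw [outer_fold_eq_map _ mc (by
    have : (PySem.Dict.ofList cc).items.map (fun p => p.1) = (PySem.Dict.ofList cc).keys := rfl
    rw [this]; exact PySem.Dict.nodup_keys_ofList cc)]
  apply List.map_congr_left
  intro p _
  rw [colmap_eq]
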